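-- pv_equiv track=rewrite | github.com/hzcheney/Denoising-Graph-of-Graphs-AutoEncoder | data_process.py | edge_dict
-- ===== SOURCE A (Python) =====
-- def edge_dict(edges, attr):
--     out_dict = {}
--     for i in range(len(attr)):
--         if attr[i] not in out_dict.keys():
--             out_dict[attr[i]] = [[edges[0][i]], [edges[1][i]]]
--         else:
--             out_dict[attr[i]][0].append(edges[0][i])
--             out_dict[attr[i]][1].append(edges[1][i])
--     return out_dict
-- ===== SOURCE B (Python) =====
-- def edge_dict(edges, attr):
--     # Group the indices by attribute value first, then materialise both
--     # endpoint lists per group in one comprehension.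
--     groups = {}
--     for i, a in enumerate(attr):
--         groups.setdefault(a, []).append(i)
--     return {a: [[edges[0][i] for i in idxs], [edges[1][i] for i in idxs]]
--             for a, idxs in groups.items()}
-- ===== Notes on version B (the rewrite author's own statement) =====
-- stated objective: alternative
-- what changed: B first groups only the indices by attribute value (one setdefault/append pass over enumerate(attr)), then materialises both endpoint lists per group in a single dict comprehension, instead of A's one pass that builds and repeatedly extends the nested two-list values inside the dict.
import Mathlib
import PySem

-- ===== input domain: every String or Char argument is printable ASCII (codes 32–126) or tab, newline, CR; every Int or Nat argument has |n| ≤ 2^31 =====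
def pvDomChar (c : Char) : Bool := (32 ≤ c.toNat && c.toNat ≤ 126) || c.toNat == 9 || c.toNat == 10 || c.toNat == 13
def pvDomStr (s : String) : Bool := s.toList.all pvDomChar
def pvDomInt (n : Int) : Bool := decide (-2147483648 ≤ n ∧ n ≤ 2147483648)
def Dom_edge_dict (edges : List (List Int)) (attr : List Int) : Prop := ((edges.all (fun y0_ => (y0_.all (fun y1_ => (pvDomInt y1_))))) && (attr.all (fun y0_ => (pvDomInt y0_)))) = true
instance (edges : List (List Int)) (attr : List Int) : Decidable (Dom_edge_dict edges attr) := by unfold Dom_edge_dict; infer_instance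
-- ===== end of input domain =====

-- B groups the indices by attribute value first, then builds both endpoint lists
-- per group in one comprehension (same O(n) cost, different decomposition).

-- ===== PORT A =====
-- Literal port of A: one pass over range(len(attr)); a fresh key gets [[e0],[e1]],
-- an existing key has e0/e1 appended to its two inner lists.
def edge_dict (edges : List (List Int)) (attr : List Int) : List (Int × List (List Int)) :=
  ((List.range attr.length).foldl
    (fun out_dict i =>
      match out_dict.get? (attr.getD i 0) with
      | none   => out_dict.insert (attr.getD i 0)
                    [[PySem.List.pyGetD (edges.getD 0 []) (i : Int) 0],
                     [PySem.List.pyGetD (edges.getD 1 []) (i : Int) 0]]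
      | some v => out_dict.insert (attr.getD i 0)
                    [(v.getD 0 []) ++ [PySem.List.pyGetD (edges.getD 0 []) (i : Int) 0],
                     (v.getD 1 []) ++ [PySem.List.pyGetD (edges.getD 1 []) (i : Int) 0]])
    PySem.Dict.empty).items

-- ===== PORT B =====
-- Literal port of Source B: group the indices (groups.setdefault(a, []).append(i) is
-- Dict.modify a [] (· ++ [i])), then one comprehension over groups.items().
def edge_dict_alt (edges : List (List Int)) (attr : List Int) : List (Int × List (List Int)) :=
  ((PySem.List.enumerate attr 0).foldl
      (fun groups p => groups.modify p.2 [] (· ++ [p.1]))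
      PySem.Dict.empty).items.map
    (fun p => (p.1, [p.2.map (fun i => PySem.List.pyGetD (edges.getD 0 []) i 0),
                     p.2.map (fun i => PySem.List.pyGetD (edges.getD 1 []) i 0)]))

-- ===== PRECONDITION & SPEC =====
-- Pre_ excludes exactly the inputs where Python A raises IndexError:
-- attr nonempty while edges has fewer than 2 rows or a row shorter than attr.
def Pre_edge_dict (edges : List (List Int)) (attr : List Int) : Prop :=
  attr = [] ∨ (2 ≤ edges.length ∧ attr.length ≤ (edges.getD 0 []).length ∧ attr.length ≤ (edges.getD 1 []).length)
instance (edges : List (List Int)) (attr : List Int) : Decidable (Pre_edge_dict edges attr) := by unfold Pre_edge_dict; infer_instance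
def pvWitness_edge_dict : List (List Int) × List Int := ([[1, 2, 3], [4, 5, 6]], [7, 8, 7])
def Spec_edge_dict (edges : List (List Int)) (attr : List Int) (out : List (Int × List (List Int))) : Prop := out = edge_dict_alt edges attr
instance (edges : List (List Int)) (attr : List Int) (out : List (Int × List (List Int))) : Decidable (Spec_edge_dict edges attr out) := by unfold Spec_edge_dict; infer_instance

-- ===== CLAIM (what is proved, stated in full; the proofs are below) =====
def Claim_equal_edge_dict : Prop := ∀ (edges : List (List Int)) (attr : List Int), Dom_edge_dict edges attr → Pre_edge_dict edges attr → Spec_edge_dict edges attr (edge_dict edges attr)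

-- ===== LEMMAS AND PROOFS =====

-- edges[0][i] and edges[1][i] as read by both ports
def pvE0 (edges : List (List Int)) (i : Int) : Int := PySem.List.pyGetD (edges.getD 0 []) i 0
def pvE1 (edges : List (List Int)) (i : Int) : Int := PySem.List.pyGetD (edges.getD 1 []) i 0
-- a group's index list, materialised as A stores it: the pair of endpoint lists
def pvF (edges : List (List Int)) (idxs : List Int) : List (List Int) :=
  [idxs.map (pvE0 edges), idxs.map (pvE1 edges)]
-- apply pvF to every value of an index-group dict
def pvMapD (edges : List (List Int)) (g : PySem.Dict Int (List Int)) : PySem.Dict Int (List (List Int)) :=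
  PySem.Dict.mk (g.items.map (fun p => (p.1, pvF edges p.2)))

lemma get?_pvMapD (E : List (List Int)) (g : PySem.Dict Int (List Int)) (a : Int) :
    (pvMapD E g).get? a = (g.get? a).map (pvF E) := by
  obtain ⟨l⟩ := g
  simp [pvMapD, PySem.Dict.get?, List.find?_map, Option.map_map, Function.comp_def]

lemma contains_pvMapD (E : List (List Int)) (g : PySem.Dict Int (List Int)) (a : Int) :
    (pvMapD E g).contains a = g.contains a := by
  obtain ⟨l⟩ := g
  simp [pvMapD, PySem.Dict.contains, List.any_map, Function.comp_def]

lemma pvMapD_insert (E : List (List Int)) (g : PySem.Dict Int (List Int)) (a : Int) (v : List Int) :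
    pvMapD E (g.insert a v) = (pvMapD E g).insert a (pvF E v) := by
  unfold PySem.Dict.insert
  rw [contains_pvMapD]
  split_ifs with h
  · apply PySem.Dict.ext
    simp only [pvMapD, List.map_map]
    apply List.map_congr_left
    intro p _
    by_cases hk : (p.1 == a) = true <;> simp [hk, Function.comp]
  · apply PySem.Dict.ext
    simp [pvMapD]

lemma pvStep_comm (E : List (List Int)) (g : PySem.Dict Int (List Int)) (i a : Int) :
    (match (pvMapD E g).get? a with
      | none   => (pvMapD E g).insert a [[pvE0 E i], [pvE1 E i]]
      | some v => (pvMapD E g).insert a [(v.getD 0 []) ++ [pvE0 E i], (v.getD 1 []) ++ [pvE1 E i]])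
      = pvMapD E (g.modify a [] (· ++ [i])) := by
  rw [get?_pvMapD]
  unfold PySem.Dict.modify
  rw [PySem.Dict.getD_eq_get?_getD]
  cases h : g.get? a with
  | none => simp [pvMapD_insert, pvF]
  | some idxs => simp [pvMapD_insert, pvF]

lemma pvLoopR (E : List (List Int)) (attr : List Int) (l : List Nat) (g : PySem.Dict Int (List Int)) :
    l.foldl
      (fun out_dict i =>
        match out_dict.get? (attr.getD i 0) with
        | none   => out_dict.insert (attr.getD i 0)
                      [[PySem.List.pyGetD (E.getD 0 []) (i : Int) 0],
                       [PySem.List.pyGetD (E.getD 1 []) (i : Int) 0]]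
        | some v => out_dict.insert (attr.getD i 0)
                      [(v.getD 0 []) ++ [PySem.List.pyGetD (E.getD 0 []) (i : Int) 0],
                       (v.getD 1 []) ++ [PySem.List.pyGetD (E.getD 1 []) (i : Int) 0]])
      (pvMapD E g)
      = pvMapD E (l.foldl (fun d i => d.modify (attr.getD i 0) [] (· ++ [(i : Int)])) g) := by
  induction l generalizing g with
  | nil => rfl
  | cons i t ih =>
      simp only [List.foldl_cons]
      have h := pvStep_comm E g (i : Int) (attr.getD i 0)
      simp only [pvE0, pvE1] at h
      rw [h]
      exact ih _

lemma pvEnum_eq (attr : List Int) (k : Int) :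
    PySem.List.enumerate attr k = (List.range attr.length).map (fun (i : Nat) => (k + (i : Int), attr.getD i 0)) := by
  induction attr generalizing k with
  | nil => simp [PySem.List.enumerate]
  | cons x t ih =>
      rw [PySem.List.enumerate]
      rw [ih (k + 1)]
      simp only [List.length_cons, List.range_succ_eq_map, List.map_cons, List.map_map]
      congr 1
      · simp
      · apply List.map_congr_left
        intro i _
        simp only [Function.comp_apply, List.getD_cons_succ]
        congr 1
        push_cast
        ring

theorem edge_dict_eq_alt (edges : List (List Int)) (attr : List Int) :
    edge_dict edges attr = edge_dict_alt edges attr := by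
  unfold edge_dict edge_dict_alt
  rw [pvEnum_eq attr 0, List.foldl_map]
  simp only [zero_add]
  rw [show (PySem.Dict.empty : PySem.Dict Int (List (List Int))) = pvMapD edges PySem.Dict.empty from rfl]
  rw [pvLoopR]
  simp [pvMapD, pvF, pvE0, pvE1]

-- ===== VERDICT (by name: the statement is the Claim_ definition above) =====
theorem edge_dict_spec : Claim_equal_edge_dict := by
  intro edges attr _ _
  unfold Spec_edge_dict
  exact edge_dict_eq_alt edges attr
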